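-- pv_equiv track=rewrite | github.com/Shepherd-ITSec/sentinel_ebpf | scripts/replay_lidds.py | _strip_lidds_strace_fd_suffix
-- ===== SOURCE A (Python) =====
-- def _strip_lidds_strace_fd_suffix(value: str) -> str:
--   """Strip strace class suffix from fd tokens: ``36(<f>/p)`` → ``36``.
--
--   Values like ``5(F_SETFL)`` are left unchanged (parenthesis is not followed by ``<``).
--   """
--   raw = (value or "").strip()
--   if not raw:
--     return raw
--   j = 0
--   if raw[0] == "-":
--     j = 1
--   start = j
--   while j < len(raw) and raw[j].isdigit():
--     j += 1
--   if j > start and j + 1 < len(raw) and raw[j] == "(" and raw[j + 1] == "<":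
--     return raw[:j]
--   return raw
-- ===== SOURCE B (Python) =====
-- def _strip_lidds_strace_fd_suffix(value: str) -> str:
--   """Find-then-validate: locate the first "(<" and check the prefix is an
--   optional-minus digit run, instead of scanning digits forward."""
--   raw = (value or "").strip()
--   if not raw:
--     return raw
--   idx = raw.find("(<")
--   if idx <= 0:
--     return raw
--   p = raw[:idx]
--   if p.startswith("-"):
--     p = p[1:]
--   if p and all("0" <= ch <= "9" for ch in p):
--     return raw[:idx]
--   return raw
-- ===== Notes on version B (the rewrite author's own statement) =====
-- stated objective: alternative
-- what changed: A scans an optional minus and a digit run forward and then checks the next two characters for the fd-class marker; B instead locates the first occurrence of the two-character marker with str.find and validates the preceding prefix as an optional-minus digit run.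
import Mathlib
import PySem

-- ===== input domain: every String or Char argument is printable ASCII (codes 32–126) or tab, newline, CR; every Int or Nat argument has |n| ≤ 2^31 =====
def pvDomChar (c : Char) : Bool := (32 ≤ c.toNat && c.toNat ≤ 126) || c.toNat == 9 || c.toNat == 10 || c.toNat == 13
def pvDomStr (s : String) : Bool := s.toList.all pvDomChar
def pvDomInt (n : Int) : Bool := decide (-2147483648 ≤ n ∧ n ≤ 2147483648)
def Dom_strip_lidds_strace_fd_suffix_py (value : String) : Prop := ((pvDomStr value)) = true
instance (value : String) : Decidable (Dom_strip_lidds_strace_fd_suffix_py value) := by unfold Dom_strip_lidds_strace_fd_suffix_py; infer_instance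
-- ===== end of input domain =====

-- B locates the first "(<" with find and validates the prefix as an optional-minus digit run,
-- instead of A's forward digit scan; same return value, different decomposition (no speed claim).


-- ===== PORT A =====
-- the `while j < len(raw) and raw[j].isdigit()` loop as the obvious structural recursion:
-- number of leading ASCII digits (Char.isDigit = Python str.isdigit on the ASCII domain)
def pvAScan : List Char → Nat
  | [] => 0
  | c :: rest => if c.isDigit then pvAScan rest + 1 else 0

def pvACore (cs : List Char) : List Char :=
  if cs = [] then cs
  else
    let start : Nat := if cs.headD ' ' = '-' then 1 else 0
    let j : Nat := start + pvAScan (cs.drop start)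
    if start < j ∧ j + 1 < cs.length ∧ cs[j]? = some '(' ∧ cs[j + 1]? = some '<' then
      cs.take j            -- raw[:j]
    else cs

def strip_lidds_strace_fd_suffix_py (value : String) : String :=
  -- raw = (value or "").strip()
  String.ofList (pvACore (PySem.Chars.strip (if value = "" then "" else value).toList))

-- ===== PORT B =====
def pvBCore (cs : List Char) : List Char :=
  if cs = [] then cs
  else
    let idx := PySem.Chars.find cs ['(', '<']      -- raw.find("(<")
    if idx ≤ 0 then cs
    else
      let p := cs.take idx.toNat                   -- raw[:idx]
      let q := if PySem.Chars.startswith p ['-'] then p.drop 1 else p   -- p[1:]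
      if q ≠ [] ∧ q.all Char.isDigit then cs.take idx.toNat else cs

def strip_lidds_strace_fd_suffix_py_alt (value : String) : String :=
  String.ofList (pvBCore (PySem.Chars.strip (if value = "" then "" else value).toList))

-- ===== PRECONDITION & SPEC =====
def Spec_strip_lidds_strace_fd_suffix_py (value : String) (out : String) : Prop := out = strip_lidds_strace_fd_suffix_py_alt value
instance (value : String) (out : String) : Decidable (Spec_strip_lidds_strace_fd_suffix_py value out) := by unfold Spec_strip_lidds_strace_fd_suffix_py; infer_instance

-- ===== CLAIM (what is proved, stated in full; the proofs are below) =====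
def Claim_equal_strip_lidds_strace_fd_suffix_py : Prop := ∀ (value : String), Dom_strip_lidds_strace_fd_suffix_py value → Spec_strip_lidds_strace_fd_suffix_py value (strip_lidds_strace_fd_suffix_py value)

-- ===== LEMMAS AND PROOFS =====

lemma pvAScan_le (cs : List Char) : pvAScan cs ≤ cs.length := by
  induction cs with
  | nil => simp [pvAScan]
  | cons c rest ih =>
    simp only [pvAScan, List.length_cons]
    split <;> omega

lemma pvAScan_digits (cs : List Char) : ∀ i < pvAScan cs, ∃ c, cs[i]? = some c ∧ c.isDigit = true := by
  induction cs with
  | nil => simp [pvAScan]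
  | cons c rest ih =>
    intro i hi
    simp only [pvAScan] at hi
    by_cases hc : c.isDigit
    · simp only [hc, if_true] at hi
      cases i with
      | zero => exact ⟨c, rfl, hc⟩
      | succ k =>
        obtain ⟨d, hd, hdd⟩ := ih k (by omega)
        exact ⟨d, by simpa using hd, hdd⟩
    · simp [hc] at hi

lemma pvAScan_ge (cs : List Char) (m : Nat)
    (h : ∀ i < m, ∃ c, cs[i]? = some c ∧ c.isDigit = true) : m ≤ pvAScan cs := by
  induction cs generalizing m with
  | nil =>
    cases m with
    | zero => simp
    | succ k => obtain ⟨c, hc, _⟩ := h 0 (by omega); simp at hc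
  | cons c rest ih =>
    cases m with
    | zero => omega
    | succ k =>
      obtain ⟨d, hd, hdd⟩ := h 0 (by omega)
      simp only [List.getElem?_cons_zero, Option.some.injEq] at hd
      subst hd
      have hk : k ≤ pvAScan rest := by
        apply ih
        intro i hi
        obtain ⟨e, he, hee⟩ := h (i + 1) (by omega)
        exact ⟨e, by simpa using he, hee⟩
      simp only [pvAScan, hdd, if_true]
      omega

-- pvAScan is pinned by an all-digits prefix and a non-digit stop character
lemma pvAScan_eq (cs : List Char) (m : Nat)
    (hall : ∀ i < m, ∃ c, cs[i]? = some c ∧ c.isDigit = true)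
    (hstop : cs[m]? = some '(') : pvAScan cs = m := by
  have h1 := pvAScan_ge cs m hall
  by_contra hne
  obtain ⟨c, hc, hcd⟩ := pvAScan_digits cs m (by omega)
  rw [hstop] at hc
  cases hc
  simp at hcd

lemma prefix2_iff (cs : List Char) (a b : Char) (n : Nat) :
    [a, b] <+: cs.drop n ↔ cs[n]? = some a ∧ cs[n + 1]? = some b := by
  constructor
  · rintro ⟨t, ht⟩
    have h0 : (cs.drop n)[0]? = some a := by rw [← ht]; rfl
    have h1 : (cs.drop n)[1]? = some b := by rw [← ht]; rfl
    rw [List.getElem?_drop] at h0 h1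
    simpa using And.intro h0 h1
  · rintro ⟨h0, h1⟩
    have h0' : (cs.drop n)[0]? = some a := by rw [List.getElem?_drop]; simpa using h0
    have h1' : (cs.drop n)[1]? = some b := by rw [List.getElem?_drop]; simpa using h1
    match hd : cs.drop n with
    | [] => rw [hd] at h0'; simp at h0'
    | [x] => rw [hd] at h0' h1'; simp at h1'
    | x :: y :: t =>
      rw [hd] at h0' h1'
      simp only [List.getElem?_cons_zero, Option.some.injEq] at h0'
      simp only [List.getElem?_cons_succ, List.getElem?_cons_zero, Option.some.injEq] at h1'
      exact ⟨t, by simp [h0', h1']⟩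

-- under A's success condition, the first occurrence of "(<" is exactly at index j
lemma find_at (cs : List Char) (j : Nat)
    (hd : ∀ i < j, ∃ c, cs[i]? = some c ∧ (c.isDigit = true ∨ (i = 0 ∧ c = '-')))
    (h1 : cs[j]? = some '(') (h2 : cs[j + 1]? = some '<') :
    PySem.Chars.find cs ['(', '<'] = (j : Int) := by
  have hpref : [ '(', '<' ] <+: cs.drop j := (prefix2_iff cs '(' '<' j).2 ⟨h1, h2⟩
  have hinfix : [ '(', '<' ] <:+: cs := by
    have := (PySem.Chars.exists_prefix_drop_iff_isIn (sub := ['(', '<']) (s := cs)).1 ⟨j, hpref⟩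
    exact (PySem.Chars.isIn_iff_infix _ _).1 this
  have hnn : 0 ≤ PySem.Chars.find cs ['(', '<'] := (PySem.Chars.find_nonneg_iff _ _).2 hinfix
  obtain ⟨hp, hmin⟩ := PySem.Chars.find_spec (s := cs) (sub := ['(', '<']) hnn
  set f := (PySem.Chars.find cs ['(', '<']).toNat with hf
  have hle : f ≤ j := by
    by_contra hlt
    exact hmin j (by omega) hpref
  have heq : f = j := by
    by_contra hne
    have hfj : f < j := by omega
    obtain ⟨hfa, _⟩ := (prefix2_iff cs '(' '<' f).1 hp
    obtain ⟨c, hc, hcd⟩ := hd f hfj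
    rw [hfa] at hc
    cases hc
    rcases hcd with h | ⟨_, h⟩
    · simp at h
    · cases h
  omega

-- the whole cons case of the cores, with A's scan start and digit count as explicit variables
lemma bridge (c : Char) (rest : List Char) (start k : Nat)
    (hs : start = if c = '-' then 1 else 0)
    (hk : k = pvAScan ((c :: rest).drop start)) :
    (if start < start + k ∧ start + k + 1 < (c :: rest).length ∧
        (c :: rest)[start + k]? = some '(' ∧ (c :: rest)[start + k + 1]? = some '<' then
      (c :: rest).take (start + k)
    else (c :: rest)) = pvBCore (c :: rest) := by
  simp only [pvBCore, if_neg (List.cons_ne_nil c rest)]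
  by_cases hA : start < start + k ∧ start + k + 1 < (c :: rest).length ∧
      (c :: rest)[start + k]? = some '(' ∧ (c :: rest)[start + k + 1]? = some '<'
  · -- A strips: show find = start + k and B's validation succeeds
    obtain ⟨hsj, hlen, hpar, hlt⟩ := hA
    have hkpos : 0 < k := by omega
    have hd : ∀ i < start + k, ∃ d, (c :: rest)[i]? = some d ∧
        (d.isDigit = true ∨ (i = 0 ∧ d = '-')) := by
      intro i hi
      by_cases hc : c = '-'
      · have hs1 : start = 1 := by simp [hs, hc]
        have hkrest : k = pvAScan rest := by rw [hk, hs1, List.drop_one, List.tail_cons]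
        cases i with
        | zero => exact ⟨c, rfl, Or.inr ⟨rfl, hc⟩⟩
        | succ m =>
          obtain ⟨d, hdg, hdd⟩ := pvAScan_digits rest m (by omega)
          exact ⟨d, by simpa using hdg, Or.inl hdd⟩
      · have hs0 : start = 0 := by simp [hs, hc]
        have hkrest : k = pvAScan (c :: rest) := by rw [hk, hs0, List.drop_zero]
        obtain ⟨d, hdg, hdd⟩ := pvAScan_digits (c :: rest) i (by omega)
        exact ⟨d, hdg, Or.inl hdd⟩
    have hfind := find_at (c :: rest) (start + k) hd hpar hlt
    rw [if_pos ⟨hsj, hlen, hpar, hlt⟩, hfind]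
    have htn : (((start + k : Nat) : Int)).toNat = start + k := by omega
    rw [if_neg (show ¬(((start + k : Nat) : Int) ≤ 0) by omega), htn]
    -- validation succeeds
    by_cases hc : c = '-'
    · have hs1 : start = 1 := by simp [hs, hc]
      have hkd : pvAScan rest = k := by rw [hk, hs1, List.drop_one, List.tail_cons]
      have hpt : (c :: rest).take (start + k) = c :: rest.take k := by
        rw [hs1, Nat.add_comm 1 k, List.take_succ_cons]
      have hsw : PySem.Chars.startswith ((c :: rest).take (start + k)) ['-'] = true := by
        rw [hpt, hc, PySem.Chars.startswith_iff]
        exact ⟨rest.take k, rfl⟩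
      rw [if_pos ?_]
      · rw [hsw, if_pos rfl, hpt, List.drop_one, List.tail_cons]
        constructor
        · have := pvAScan_le rest
          intro hnil
          have := congrArg List.length hnil
          simp only [List.length_take, List.length_nil] at this
          rw [hkd] at *
          omega
        · rw [List.all_eq_true]
          intro x hx
          obtain ⟨m, hm, hxm⟩ := List.getElem_of_mem hx
          have hmk : m < k := by simp only [List.length_take] at hm; omega
          obtain ⟨d, hdg, hdd⟩ := pvAScan_digits rest m (by omega)
          have hmt : (rest.take k)[m]? = rest[m]? := List.getElem?_take_of_lt (by omega)
          rw [← hxm]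
          have hsome : (rest.take k)[m]? = some (rest.take k)[m] := List.getElem?_eq_getElem hm
          rw [hmt, hdg] at hsome
          cases hsome
          exact hdd
    · have hs0 : start = 0 := by simp [hs, hc]
      have hkd : pvAScan (c :: rest) = k := by rw [hk, hs0, List.drop_zero]
      have hsw : PySem.Chars.startswith ((c :: rest).take (start + k)) ['-'] = false := by
        rw [Bool.eq_false_iff]
        intro hsw
        rw [PySem.Chars.startswith_iff] at hsw
        obtain ⟨t, ht⟩ := hsw
        have h0 : ((c :: rest).take (start + k))[0]? = some '-' := by rw [← ht]; rfl
        rw [List.getElem?_take_of_lt (by omega)] at h0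
        simp only [List.getElem?_cons_zero, Option.some.injEq] at h0
        exact hc h0
      rw [if_pos ?_]
      · rw [hsw, if_neg (by simp)]
        constructor
        · have := pvAScan_le (c :: rest)
          intro hnil
          have := congrArg List.length hnil
          simp only [List.length_take, List.length_nil, List.length_cons] at this
          rw [hkd] at *
          omega
        · rw [List.all_eq_true]
          intro x hx
          obtain ⟨m, hm, hxm⟩ := List.getElem_of_mem hx
          have hmk : m < start + k := by simp only [List.length_take] at hm; omega
          obtain ⟨d, hdg, hdd⟩ := pvAScan_digits (c :: rest) m (by omega)
          have hmt : ((c :: rest).take (start + k))[m]? = (c :: rest)[m]? :=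
            List.getElem?_take_of_lt (by omega)
          rw [← hxm]
          have hsome : ((c :: rest).take (start + k))[m]? = some ((c :: rest).take (start + k))[m] :=
            List.getElem?_eq_getElem hm
          rw [hmt, hdg] at hsome
          cases hsome
          exact hdd
  · -- A leaves cs unchanged: show B does too
    rw [if_neg hA]
    by_cases hf : PySem.Chars.find (c :: rest) ['(', '<'] ≤ 0
    · rw [if_pos hf]
    · rw [if_neg hf]
      obtain ⟨n, hn⟩ : ∃ n : Nat, PySem.Chars.find (c :: rest) ['(', '<'] = (n : Int) :=
        ⟨(PySem.Chars.find (c :: rest) ['(', '<']).toNat, (Int.toNat_of_nonneg (by omega)).symm⟩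
      have hnpos : 0 < n := by omega
      obtain ⟨hp, -⟩ := PySem.Chars.find_spec (s := c :: rest) (sub := ['(', '<']) (by omega)
      rw [hn] at hp
      simp only [Int.toNat_natCast] at hp
      rw [hn]
      simp only [Int.toNat_natCast]
      obtain ⟨hpar, hlt⟩ := (prefix2_iff (c :: rest) '(' '<' n).1 hp
      have hnlen : n + 1 < (c :: rest).length := by
        by_contra hcon
        rw [List.getElem?_eq_none (by omega : (c :: rest).length ≤ n + 1)] at hlt
        cases hlt
      have hlenc : (c :: rest).length = rest.length + 1 := by simp
      rw [if_neg ?_]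
      · -- validation must fail, else A's condition would have held
        rintro ⟨hne, hall⟩
        apply hA
        by_cases hc : c = '-'
        · have hs1 : start = 1 := by simp [hs, hc]
          have hpt : (c :: rest).take n = c :: rest.take (n - 1) := by
            have hsplit : n = (n - 1) + 1 := by omega
            rw [hsplit, List.take_succ_cons, Nat.add_sub_cancel]
          have hsw : PySem.Chars.startswith ((c :: rest).take n) ['-'] = true := by
            rw [hpt, hc, PySem.Chars.startswith_iff]
            exact ⟨rest.take (n - 1), rfl⟩
          rw [hsw, if_pos rfl, hpt, List.drop_one, List.tail_cons] at hne hall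
          have hq1 : 0 < n - 1 := by
            rcases Nat.eq_zero_or_pos (n - 1) with h | h
            · rw [h] at hne; simp at hne
            · exact h
          have hallm : ∀ i < n - 1, ∃ d, rest[i]? = some d ∧ d.isDigit = true := by
            intro i hi
            have hlt' : i < (rest.take (n - 1)).length := by
              simp only [List.length_take]
              omega
            refine ⟨(rest.take (n - 1))[i], ?_, ?_⟩
            · rw [← List.getElem?_take_of_lt (show i < n - 1 by omega)]
              exact List.getElem?_eq_getElem hlt'
            · exact (List.all_eq_true.1 hall) _ (List.getElem_mem hlt')
          have hscan : pvAScan rest = n - 1 := by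
            apply pvAScan_eq
            · exact hallm
            · have hsplit2 : n - 1 + 1 = n := by omega
              rw [← hsplit2, List.getElem?_cons_succ] at hpar
              exact hpar
          have hkv : k = n - 1 := by
            rw [hk, hs1, List.drop_one, List.tail_cons, hscan]
          have hjv : start + k = n := by omega
          rw [hjv]
          exact ⟨by omega, hnlen, hpar, hlt⟩
        · have hs0 : start = 0 := by simp [hs, hc]
          have hsw : PySem.Chars.startswith ((c :: rest).take n) ['-'] = false := by
            rw [Bool.eq_false_iff]
            intro hsw
            rw [PySem.Chars.startswith_iff] at hsw
            obtain ⟨t, ht⟩ := hsw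
            have h0 : ((c :: rest).take n)[0]? = some '-' := by rw [← ht]; rfl
            rw [List.getElem?_take_of_lt (by omega)] at h0
            simp only [List.getElem?_cons_zero, Option.some.injEq] at h0
            exact hc h0
          rw [hsw, if_neg (by simp)] at hne hall
          have hallm : ∀ i < n, ∃ d, (c :: rest)[i]? = some d ∧ d.isDigit = true := by
            intro i hi
            have hlt' : i < ((c :: rest).take n).length := by
              simp only [List.length_take]
              omega
            refine ⟨((c :: rest).take n)[i], ?_, ?_⟩
            · rw [← List.getElem?_take_of_lt (show i < n by omega)]
              exact List.getElem?_eq_getElem hlt'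
            · exact (List.all_eq_true.1 hall) _ (List.getElem_mem hlt')
          have hscan : pvAScan (c :: rest) = n := pvAScan_eq _ _ hallm hpar
          have hkv : k = n := by rw [hk, hs0, List.drop_zero, hscan]
          have hjv : start + k = n := by omega
          rw [hjv]
          exact ⟨by omega, hnlen, hpar, hlt⟩

-- the core equivalence, on the stripped character list
lemma core_eq (cs : List Char) : pvACore cs = pvBCore cs := by
  cases cs with
  | nil => rfl
  | cons c rest =>
    exact bridge c rest (if c = '-' then 1 else 0)
      (pvAScan ((c :: rest).drop (if c = '-' then 1 else 0))) rfl rfl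

-- ===== VERDICT (by name: the statement is the Claim_ definition above) =====
theorem strip_lidds_strace_fd_suffix_py_spec : Claim_equal_strip_lidds_strace_fd_suffix_py := by
  intro value _
  unfold Spec_strip_lidds_strace_fd_suffix_py strip_lidds_strace_fd_suffix_py strip_lidds_strace_fd_suffix_py_alt
  rw [core_eq]
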